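-- pv_equiv track=rewrite | github.com/actions-marketplace-validations/KonstZiv_ai-code-reviewer | src/ai_reviewer/discovery/config_collector.py | _filter_configs
-- ===== SOURCE A (Python) =====
-- from typing import Iterable, Sequence
--
-- def _filter_configs(
--     file_tree: Sequence[str],
--     keys: Iterable[str],
--     mapping: dict[str, tuple[str, ...]],
-- ) -> tuple[str, ...]:
--     """Filter and deduplicate config paths against the file tree.
--
--     Args:
--         file_tree: Repository file paths to match against.
--         keys: Lookup keys (tool names or language names).
--         mapping: Key → candidate config paths mapping.
--
--     Returns:
--         Sorted, deduplicated tuple of config paths present in file tree.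
--     """
--     file_set = set(file_tree)
--     seen: set[str] = set()
--     result: list[str] = []
--
--     for key in keys:
--         for path in mapping.get(key, ()):
--             if path not in seen and path in file_set:
--                 seen.add(path)
--                 result.append(path)
--
--     result.sort()
--     return tuple(result)
-- ===== SOURCE B (Python) =====
-- def _filter_configs(file_tree, keys, mapping):
--     """Sort the file tree, scan it once skipping adjacent duplicates, and keep
--     each path that some key maps to; no sets, the result is built in order."""
--     result = []
--     prev = None
--     for path in sorted(file_tree):
--         if path == prev:
--             continue
--         prev = path
--         if any(path in mapping.get(key, ()) for key in keys):
--             result.append(path)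
--     return tuple(result)
-- ===== Notes on version B (the rewrite author's own statement) =====
-- stated objective: alternative
-- what changed: Instead of scanning mapped candidates and filtering them against a file set with a seen-set, B sorts the file tree first, scans it once skipping adjacent duplicates, and keeps each path iff some key maps to it; dedup comes from the sorted adjacency, order from building the result already sorted, and no sets are used at all.
import Mathlib
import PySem

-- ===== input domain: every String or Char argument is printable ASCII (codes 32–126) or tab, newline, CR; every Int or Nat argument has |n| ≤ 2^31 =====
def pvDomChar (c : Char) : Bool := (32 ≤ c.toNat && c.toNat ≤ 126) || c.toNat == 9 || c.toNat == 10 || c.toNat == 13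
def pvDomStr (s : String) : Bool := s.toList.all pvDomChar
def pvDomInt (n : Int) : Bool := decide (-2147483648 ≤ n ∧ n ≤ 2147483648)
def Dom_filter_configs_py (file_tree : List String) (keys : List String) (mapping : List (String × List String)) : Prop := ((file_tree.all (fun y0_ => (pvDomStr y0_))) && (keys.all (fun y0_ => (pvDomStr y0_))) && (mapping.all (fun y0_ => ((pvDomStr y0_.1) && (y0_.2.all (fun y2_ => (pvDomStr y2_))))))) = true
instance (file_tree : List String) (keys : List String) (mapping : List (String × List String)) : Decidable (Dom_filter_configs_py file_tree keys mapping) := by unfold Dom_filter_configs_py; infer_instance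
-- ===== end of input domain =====

-- B sorts the file tree first and scans it once, skipping adjacent duplicates and
-- keeping each path iff some key maps to it — no sets, the result is built in order.

-- shared primitive: Python's mapping.get(key, ()) on the association list (first match)
def mappingGetD (mapping : List (String × List String)) (key : String) : List String :=
  ((mapping.find? (fun p => p.1 == key)).map Prod.snd).getD []

-- ===== PORT A =====
-- for key in keys: for path in mapping.get(key, ()): if path not in seen and path in file_set: seen.add(path); result.append(path); result.sort()
def filter_configs_py (file_tree : List String) (keys : List String) (mapping : List (String × List String)) : List String :=
  let file_set : PySem.Set String := PySem.Set.ofList file_tree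
  let st : PySem.Set String × List String :=
    keys.foldl (fun st key =>
      (mappingGetD mapping key).foldl (fun st path =>
        if (!(PySem.Set.contains st.1 path)) && PySem.Set.contains file_set path then
          (PySem.Set.add st.1 path, st.2 ++ [path])
        else st) st)
      (PySem.Set.empty, [])
  PySem.List.sorted st.2 (fun x => x) false

-- ===== PORT B =====
-- result=[]; prev=None; for path in sorted(file_tree): if path == prev: continue; prev = path;
--   if any(path in mapping.get(key, ()) for key in keys): result.append(path)
def filter_configs_py_alt (file_tree : List String) (keys : List String) (mapping : List (String × List String)) : List String :=
  let st : Option String × List String :=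
    (PySem.List.sorted file_tree (fun x => x) false).foldl
      (fun st path =>
        if st.1 == some path then st
        else (some path,
          if keys.any (fun key => (mappingGetD mapping key).contains path) then st.2 ++ [path] else st.2))
      (none, [])
  st.2

-- ===== PRECONDITION & SPEC =====
def Spec_filter_configs_py (file_tree : List String) (keys : List String) (mapping : List (String × List String)) (out : List String) : Prop := out = filter_configs_py_alt file_tree keys mapping
instance (file_tree : List String) (keys : List String) (mapping : List (String × List String)) (out : List String) : Decidable (Spec_filter_configs_py file_tree keys mapping out) := by unfold Spec_filter_configs_py; infer_instance

-- ===== CLAIM (what is proved, stated in full; the proofs are below) =====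
def Claim_equal_filter_configs_py : Prop := ∀ (file_tree : List String) (keys : List String) (mapping : List (String × List String)), Dom_filter_configs_py file_tree keys mapping → Spec_filter_configs_py file_tree keys mapping (filter_configs_py file_tree keys mapping)

-- ===== LEMMAS AND PROOFS =====

-- A's inner loop over one candidate list: the state keeps seen = members of result,
-- result Nodup, and result grows by exactly the new paths of L that are in file_tree.
theorem aInner_props (file_tree : List String) (L : List String)
    (st : PySem.Set String × List String)
    (hseen : ∀ x, x ∈ st.1 ↔ x ∈ st.2) (hnd : st.2.Nodup) :
    let st' := L.foldl (fun st path =>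
        if (!(PySem.Set.contains st.1 path)) && PySem.Set.contains (PySem.Set.ofList file_tree) path then
          (PySem.Set.add st.1 path, st.2 ++ [path])
        else st) st
    (∀ x, x ∈ st'.1 ↔ x ∈ st'.2) ∧ st'.2.Nodup ∧
      (∀ x, x ∈ st'.2 ↔ x ∈ st.2 ∨ (x ∈ L ∧ x ∈ file_tree)) := by
  induction L generalizing st with
  | nil => exact ⟨hseen, hnd, by simp⟩
  | cons p L ih =>
    simp only [List.foldl_cons]
    by_cases hc : (!(PySem.Set.contains st.1 p)) && PySem.Set.contains (PySem.Set.ofList file_tree) p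
    · rw [if_pos hc]
      simp only [Bool.and_eq_true, Bool.not_eq_true', PySem.Set.contains_eq_listContains,
        List.contains_eq_mem, decide_eq_false_iff_not, decide_eq_true_eq,
        PySem.Set.mem_ofList] at hc
      obtain ⟨hnp, hft⟩ := hc
      have hseen' : ∀ x, x ∈ PySem.Set.add st.1 p ↔ x ∈ st.2 ++ [p] := by
        intro x
        rw [PySem.Set.mem_add]
        simp [hseen x, or_comm]
      have hnd' : (st.2 ++ [p]).Nodup := by
        refine List.Nodup.append hnd (List.nodup_singleton p) ?_
        intro a ha hb
        rw [List.mem_singleton] at hb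
        subst hb
        exact hnp ((hseen a).mpr ha)
      obtain ⟨h1, h2, h3⟩ := ih (PySem.Set.add st.1 p, st.2 ++ [p]) hseen' hnd'
      refine ⟨h1, h2, ?_⟩
      intro x
      rw [h3 x]
      simp only [List.mem_append, List.mem_cons, List.not_mem_nil, or_false]
      constructor
      · rintro ((h | rfl) | ⟨h, h'⟩)
        · exact Or.inl h
        · exact Or.inr ⟨Or.inl rfl, hft⟩
        · exact Or.inr ⟨Or.inr h, h'⟩
      · rintro (h | ⟨h | h, h'⟩)
        · exact Or.inl (Or.inl h)
        · exact Or.inl (Or.inr h)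
        · exact Or.inr ⟨h, h'⟩
    · rw [if_neg hc]
      have hc' : p ∈ file_tree → p ∈ st.1 := by
        intro hft
        by_contra hp
        apply hc
        simp only [Bool.and_eq_true, Bool.not_eq_true', PySem.Set.contains_eq_listContains,
          List.contains_eq_mem, decide_eq_false_iff_not, decide_eq_true_eq,
          PySem.Set.mem_ofList]
        exact ⟨hp, hft⟩
      obtain ⟨h1, h2, h3⟩ := ih st hseen hnd
      refine ⟨h1, h2, ?_⟩
      intro x
      rw [h3 x]
      simp only [List.mem_cons]
      constructor
      · rintro (h | ⟨h, h'⟩)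
        · exact Or.inl h
        · exact Or.inr ⟨Or.inr h, h'⟩
      · rintro (h | ⟨h | h, h'⟩)
        · exact Or.inl h
        · subst h
          exact Or.inl ((hseen x).mp (hc' h'))
        · exact Or.inr ⟨h, h'⟩

-- A's outer loop: result is Nodup and its members are the present candidate paths.
theorem aOuter_props (file_tree : List String) (mapping : List (String × List String))
    (keys : List String) (st : PySem.Set String × List String)
    (hseen : ∀ x, x ∈ st.1 ↔ x ∈ st.2) (hnd : st.2.Nodup) :
    let st' := keys.foldl (fun st key =>
        (mappingGetD mapping key).foldl (fun st path =>
          if (!(PySem.Set.contains st.1 path)) && PySem.Set.contains (PySem.Set.ofList file_tree) path then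
            (PySem.Set.add st.1 path, st.2 ++ [path])
          else st) st) st
    (∀ x, x ∈ st'.1 ↔ x ∈ st'.2) ∧ st'.2.Nodup ∧
      (∀ x, x ∈ st'.2 ↔ x ∈ st.2 ∨
        ((∃ k ∈ keys, x ∈ mappingGetD mapping k) ∧ x ∈ file_tree)) := by
  induction keys generalizing st with
  | nil => exact ⟨hseen, hnd, by simp⟩
  | cons k ks ih =>
    simp only [List.foldl_cons]
    obtain ⟨h1, h2, h3⟩ := aInner_props file_tree (mappingGetD mapping k) st hseen hnd
    obtain ⟨g1, g2, g3⟩ := ih _ h1 h2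
    refine ⟨g1, g2, ?_⟩
    intro x
    rw [g3 x, h3 x]
    constructor
    · rintro ((h | ⟨h, h'⟩) | ⟨⟨k', hk', hx⟩, h'⟩)
      · exact Or.inl h
      · exact Or.inr ⟨⟨k, List.mem_cons_self .., h⟩, h'⟩
      · exact Or.inr ⟨⟨k', List.mem_cons_of_mem _ hk', hx⟩, h'⟩
    · rintro (h | ⟨⟨k', hk', hx⟩, h'⟩)
      · exact Or.inl (Or.inl h)
      · rcases List.mem_cons.mp hk' with h | h
        · exact Or.inl (Or.inr ⟨h ▸ hx, h'⟩)
        · exact Or.inr ⟨⟨k', h, hx⟩, h'⟩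

-- B's scan over the ≤-sorted file tree: the accumulator stays strictly increasing
-- and collects exactly the not-yet-seen paths satisfying the predicate.
theorem bScan_props (P : String → Bool) (l : List String) (p : Option String) (acc : List String)
    (hl : l.Pairwise (· ≤ ·))
    (hprev : ∀ q, p = some q → ∀ x ∈ l, q ≤ x)
    (haccp : ∀ x ∈ acc, ∃ q, p = some q ∧ x ≤ q)
    (hacc : acc.Pairwise (· < ·)) :
    let st := l.foldl (fun st path =>
        if st.1 == some path then st
        else (some path, if P path then st.2 ++ [path] else st.2)) (p, acc)
    st.2.Pairwise (· < ·) ∧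
      (∀ x, x ∈ st.2 ↔ x ∈ acc ∨ (x ∈ l ∧ P x = true ∧ p ≠ some x)) := by
  induction l generalizing p acc with
  | nil => exact ⟨hacc, by simp⟩
  | cons a l ih =>
    rw [List.pairwise_cons] at hl
    obtain ⟨ha, hl'⟩ := hl
    simp only [List.foldl_cons]
    by_cases hpa : p = some a
    · rw [if_pos (by simp [hpa])]
      have hprev' : ∀ q, p = some q → ∀ x ∈ l, q ≤ x := by
        intro q hq x hx
        rw [hpa] at hq
        injection hq with hq
        exact hq ▸ ha x hx
      obtain ⟨g1, g2⟩ := ih p acc hl' hprev' haccp hacc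
      refine ⟨g1, ?_⟩
      intro x
      rw [g2 x]
      constructor
      · rintro (h | ⟨h, h', h''⟩)
        · exact Or.inl h
        · exact Or.inr ⟨List.mem_cons_of_mem _ h, h', h''⟩
      · rintro (h | ⟨h, h', h''⟩)
        · exact Or.inl h
        · rcases List.mem_cons.mp h with rfl | h
          · exact absurd hpa h''
          · exact Or.inr ⟨h, h', h''⟩
    · rw [if_neg (by simp [hpa])]
      have hlta : ∀ x ∈ acc, x < a := by
        intro x hx
        obtain ⟨q, hq, hxq⟩ := haccp x hx
        have hqa : q ≤ a := hprev q hq a (List.mem_cons_self ..)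
        have hqa' : q ≠ a := fun h => hpa (h ▸ hq)
        exact lt_of_le_of_lt hxq (lt_of_le_of_ne hqa hqa')
      have hana : a ∉ acc := fun h => lt_irrefl a (hlta a h)
      set acc' := if P a then acc ++ [a] else acc with hacc'def
      have hacc' : acc'.Pairwise (· < ·) := by
        rw [hacc'def]
        split
        · exact List.pairwise_append.mpr ⟨hacc, List.pairwise_singleton _ _,
            fun x hx y hy => (List.mem_singleton.mp hy) ▸ hlta x hx⟩
        · exact hacc
      have haccp' : ∀ x ∈ acc', ∃ q, some a = some q ∧ x ≤ q := by
        intro x hx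
        refine ⟨a, rfl, ?_⟩
        rw [hacc'def] at hx
        rcases (by split at hx <;> simp_all : x ∈ acc ∨ x = a) with h | rfl
        · exact le_of_lt (hlta x h)
        · exact le_refl x
      have hprev' : ∀ q, some a = some q → ∀ x ∈ l, q ≤ x := by
        intro q hq x hx
        injection hq with hq
        exact hq ▸ ha x hx
      obtain ⟨g1, g2⟩ := ih (some a) acc' hl' hprev' haccp' hacc'
      refine ⟨g1, ?_⟩
      intro x
      rw [g2 x]
      have hmem' : x ∈ acc' ↔ x ∈ acc ∨ (x = a ∧ P a = true) := by
        by_cases hP : P a = true <;> simp [hacc'def, hP, List.mem_append]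
      rw [hmem']
      constructor
      · rintro ((h | ⟨rfl, hP⟩) | ⟨h, h', h''⟩)
        · exact Or.inl h
        · exact Or.inr ⟨List.mem_cons_self .., hP, hpa⟩
        · refine Or.inr ⟨List.mem_cons_of_mem _ h, h', ?_⟩
          intro hpx
          have hxa : x ≤ a := hprev x hpx a (List.mem_cons_self ..)
          have hax : a ≤ x := ha x h
          exact hpa (le_antisymm hxa hax ▸ hpx)
      · rintro (h | ⟨h, h', h''⟩)
        · exact Or.inl (Or.inl h)
        · rcases List.mem_cons.mp h with rfl | h
          · exact Or.inl (Or.inr ⟨rfl, h'⟩)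
          · by_cases hxa : x = a
            · exact Or.inl (Or.inr ⟨hxa, hxa ▸ h'⟩)
            · exact Or.inr ⟨h, h', fun hh => hxa (Option.some.inj hh).symm⟩

-- ===== VERDICT (by name: the statement is the Claim_ definition above) =====
theorem filter_configs_py_spec : Claim_equal_filter_configs_py := by
  intro file_tree keys mapping _
  unfold Spec_filter_configs_py filter_configs_py filter_configs_py_alt
  obtain ⟨_, hAnd, hAmem⟩ := aOuter_props file_tree mapping keys (PySem.Set.empty, [])
    (by simp [PySem.Set.empty]) (by simp)
  obtain ⟨hBsorted, hBmem⟩ := bScan_props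
    (fun path => keys.any (fun key => (mappingGetD mapping key).contains path))
    (PySem.List.sorted file_tree (fun x => x) false) none []
    (by simpa using PySem.List.sorted_pairwise file_tree (fun x => x))
    (by simp) (by simp) (by simp)
  refine PySem.List.sorted_eq_of_perm_of_pairwise_lt _ _ _ ?_ ?_
  · rw [List.perm_ext_iff_of_nodup (show List.Nodup _ from hBsorted.imp ne_of_lt) hAnd]
    intro x
    rw [hBmem x, hAmem x]
    simp only [PySem.List.mem_sorted, List.any_eq_true, List.contains_eq_mem,
      decide_eq_true_eq, List.not_mem_nil, false_or,
      ne_eq, reduceCtorEq, not_false_eq_true, and_true]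
    constructor
    · rintro ⟨hft, k, hk, hx⟩; exact ⟨⟨k, hk, hx⟩, hft⟩
    · rintro ⟨⟨k, hk, hx⟩, hft⟩; exact ⟨hft, k, hk, hx⟩
  · exact hBsorted
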